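-- pv_equiv track=rewrite | github.com/pierredvd/python3-webserver-scratch | source/nano/server.py | _httpname2camelcase
-- ===== SOURCE A (Python) =====
-- def _httpname2camelcase(name: str) -> str:
--     camelCase   = ''
--     i           = 0
--     length      = len(name)
--     char        = None
--     upper       = False
--     for i in range(0, length):
--         char = name[i]
--         if char=='-':
--             upper = True
--         else:
--             if upper:
--                 camelCase += char.upper()
--             else:
--                 camelCase += char.lower()
--             upper = False
--     return camelCase
-- ===== SOURCE B (Python) =====
-- def _httpname2camelcase(name: str) -> str:
--     parts = name.split('-')
--     return parts[0].lower() + ''.join(p[:1].upper() + p[1:].lower() for p in parts[1:])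
-- ===== Notes on version B (the rewrite author's own statement) =====
-- stated objective: idiomatic
-- what changed: Replaced A's per-character index loop carrying a capitalize-next boolean flag by splitting the name on the dash separator, lowercasing the first segment and capitalising (first char upper, rest lower) each remaining segment, joined back together.
import Mathlib
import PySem

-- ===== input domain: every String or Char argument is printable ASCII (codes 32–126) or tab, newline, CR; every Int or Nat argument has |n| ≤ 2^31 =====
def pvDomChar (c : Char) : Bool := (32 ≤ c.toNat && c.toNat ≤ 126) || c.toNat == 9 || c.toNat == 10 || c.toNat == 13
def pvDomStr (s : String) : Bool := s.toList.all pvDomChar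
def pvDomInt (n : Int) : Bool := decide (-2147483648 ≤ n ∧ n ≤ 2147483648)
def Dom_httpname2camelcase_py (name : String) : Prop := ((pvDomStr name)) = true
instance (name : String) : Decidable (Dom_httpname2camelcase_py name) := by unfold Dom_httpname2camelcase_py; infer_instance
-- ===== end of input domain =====

-- B replaces A's char-by-char scan carrying a capitalize-next flag by a split on the
-- dash separator, lowercasing the first segment and capitalising the rest (idiomatic).

-- ===== PORT A =====
-- A: index loop over range(0, len(name)) carrying (camelCase, upper); name[i] is always
-- in range, ported as pyGetD (the default is never used).
def httpname2camelcase_py (name : String) : String :=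
  let cs := name.toList
  let st := (PySem.List.pyRange 0 (PySem.Str.len name) 1).foldl
    (fun (s : List Char × Bool) i =>
      let char := PySem.List.pyGetD cs i ' '
      if char == '-' then (s.1, true)
      else if s.2 then (s.1 ++ [PySem.Chars.upperChar char], false)
      else (s.1 ++ [PySem.Chars.lowerChar char], false))
    ([], false)
  String.ofList st.1

-- ===== PORT B =====
-- B: parts = name.split('-'); parts is never empty, so parts[0] is ported as headD
-- (the default is never used); p[:1] / p[1:] are the slices.
def httpname2camelcase_py_alt (name : String) : String :=
  let parts := PySem.Chars.splitOn name.toList ['-']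
  let head := PySem.Chars.lower (parts.headD [])
  let tail := (parts.drop 1).map (fun p =>
    PySem.Chars.upper (PySem.List.slice p none (some 1))
      ++ PySem.Chars.lower (PySem.List.slice p (some 1) none))
  String.ofList (head ++ PySem.Chars.join [] tail)

-- ===== PRECONDITION & SPEC =====
def Spec_httpname2camelcase_py (name : String) (out : String) : Prop := out = httpname2camelcase_py_alt name
instance (name : String) (out : String) : Decidable (Spec_httpname2camelcase_py name out) := by unfold Spec_httpname2camelcase_py; infer_instance

-- ===== CLAIM (what is proved, stated in full; the proofs are below) =====
def Claim_equal_httpname2camelcase_py : Prop := ∀ (name : String), Dom_httpname2camelcase_py name → Spec_httpname2camelcase_py name (httpname2camelcase_py name)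

-- ===== LEMMAS AND PROOFS =====

-- A's loop as a structural recursion on the character list with the 'upper' flag.
def pvCamel : List Char → Bool → List Char
  | [], _ => []
  | c :: rest, u =>
    if c == '-' then pvCamel rest true
    else (if u then PySem.Chars.upperChar c else PySem.Chars.lowerChar c) :: pvCamel rest false

-- splitOn [-] as a structural recursion carrying the current segment.
def pvSplit (cur : List Char) : List Char → List (List Char)
  | [] => [cur]
  | c :: rest => if c == '-' then cur :: pvSplit [] rest else pvSplit (cur ++ [c]) rest

lemma pvSplitOn_go :
    ∀ fuel cs cur acc, cs.length < fuel →
      PySem.Chars.splitOn.go ['-'] fuel cs cur acc = acc.reverse ++ pvSplit cur.reverse cs := by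
  intro fuel
  induction fuel with
  | zero => intro cs cur acc h; omega
  | succ n ih =>
    intro cs cur acc h
    cases cs with
    | nil => simp [PySem.Chars.splitOn.go, pvSplit]
    | cons c rest =>
      simp only [PySem.Chars.splitOn.go]
      by_cases hc : c = '-'
      · subst hc
        have hp : List.isPrefixOf ['-'] ('-' :: rest) = true := by
          simp [List.isPrefixOf]
        simp only [hp, if_pos]
        rw [ih _ _ _ (by simpa using Nat.lt_of_succ_lt_succ h)]
        simp [pvSplit]
      · have hp : List.isPrefixOf ['-'] (c :: rest) = false := by
          simp [List.isPrefixOf]; exact fun h => hc h.symm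
        simp only [hp, Bool.false_eq_true, if_false]
        rw [ih _ _ _ (by simpa using Nat.lt_of_succ_lt_succ h)]
        simp [pvSplit, hc]

lemma pvSplitOn_eq (cs : List Char) :
    PySem.Chars.splitOn cs ['-'] = pvSplit [] cs := by
  show PySem.Chars.splitOn.go ['-'] (cs.length + 1) cs [] [] = _
  rw [pvSplitOn_go (cs.length + 1) cs [] [] (Nat.lt_succ_self _)]
  simp

-- B's per-segment transformation.
def pvCap (p : List Char) : List Char :=
  PySem.Chars.upper (PySem.List.slice p none (some 1))
    ++ PySem.Chars.lower (PySem.List.slice p (some 1) none)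

lemma pvCap_nil : pvCap [] = [] := by decide

lemma pvCap_cons (c : Char) (p : List Char) :
    pvCap (c :: p) = PySem.Chars.upperChar c :: PySem.Chars.lower p := by
  have h1 := PySem.List.slice_to (c :: p) (b := 1) (by omega)
  have h2 := PySem.List.slice_from (c :: p) (a := 1) (by omega)
  simp [pvCap, h1, h2, PySem.Chars.upper, PySem.Chars.lower]

lemma pvJoin_nil_eq_flatten (ps : List (List Char)) :
    PySem.Chars.join [] ps = ps.flatten := by
  induction ps with
  | nil => rfl
  | cons p ps ih =>
    cases ps with
    | nil => simp [PySem.Chars.join, List.intercalate]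
    | cons q qs =>
      rw [PySem.Chars.join_cons_cons]
      simp only [List.flatten_cons]
      rw [← List.flatten_cons]
      rw [ih]
      simp

-- flatMap of pvCap over the tail segments computes A's upper-mode scan.
lemma pvTail_eq :
    ∀ cs : List Char,
      ((List.map pvCap (pvSplit [] cs)).flatten = pvCamel cs true) ∧
      (∀ c cur, (List.map pvCap (pvSplit (c :: cur) cs)).flatten
          = (PySem.Chars.upperChar c :: PySem.Chars.lower cur) ++ pvCamel cs false) := by
  intro cs
  induction cs with
  | nil =>
    constructor
    · simp [pvSplit, pvCamel, pvCap_nil]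
    · intro c cur; simp [pvSplit, pvCamel, pvCap_cons]
  | cons a rest ih =>
    constructor
    · by_cases ha : a = '-'
      · subst ha
        simp [pvSplit, pvCamel, pvCap_nil, ih.1]
      · simp only [pvSplit, pvCamel, ha, beq_iff_eq, if_false]
        have := ih.2 a []
        simpa [PySem.Chars.lower] using this
    · intro c cur
      by_cases ha : a = '-'
      · subst ha
        simp [pvSplit, pvCamel, pvCap_cons, ih.1]
      · simp only [pvSplit, pvCamel, beq_iff_eq, if_neg ha]
        have := ih.2 c (cur ++ [a])
        simpa [PySem.Chars.lower, ha] using this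

-- the head segment: lower(parts[0]) followed by the capitalised tail is A's scan.
lemma pvHead_eq :
    ∀ (cs cur : List Char),
      PySem.Chars.lower ((pvSplit cur cs).headD [])
        ++ (List.map pvCap ((pvSplit cur cs).drop 1)).flatten
      = PySem.Chars.lower cur ++ pvCamel cs false := by
  intro cs
  induction cs with
  | nil => intro cur; simp [pvSplit, pvCamel]
  | cons a rest ih =>
    intro cur
    by_cases ha : a = '-'
    · subst ha
      simp only [pvSplit, beq_self_eq_true, if_pos, List.headD_cons, List.drop_succ_cons,
        List.drop_zero, pvCamel]
      rw [(pvTail_eq rest).1]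
    · simp only [pvSplit, beq_iff_eq, if_neg ha, pvCamel]
      rw [ih (cur ++ [a])]
      simp [PySem.Chars.lower]

-- A's foldl accumulates exactly pvCamel.
lemma pvFoldl_camel :
    ∀ (cs : List Char) (acc : List Char) (u : Bool),
      (cs.foldl (fun (s : List Char × Bool) char =>
        if char == '-' then (s.1, true)
        else if s.2 then (s.1 ++ [PySem.Chars.upperChar char], false)
        else (s.1 ++ [PySem.Chars.lowerChar char], false)) (acc, u)).1
      = acc ++ pvCamel cs u := by
  intro cs
  induction cs with
  | nil => intro acc u; simp [pvCamel]
  | cons c rest ih =>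
    intro acc u
    simp only [beq_iff_eq] at ih
    by_cases hc : c = '-'
    · subst hc; simp [pvCamel, ih]
    · cases u <;> simp [pvCamel, hc, ih]

-- ===== VERDICT (by name: the statement is the Claim_ definition above) =====
theorem httpname2camelcase_py_spec : Claim_equal_httpname2camelcase_py := by
  intro name _
  show httpname2camelcase_py name = httpname2camelcase_py_alt name
  unfold httpname2camelcase_py httpname2camelcase_py_alt
  simp only [PySem.Str.len_eq]
  rw [PySem.List.foldl_pyRange_zero_pyGetD' name.toList ' '
    (fun (s : List Char × Bool) char =>
      if char == '-' then (s.1, true)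
      else if s.2 then (s.1 ++ [PySem.Chars.upperChar char], false)
      else (s.1 ++ [PySem.Chars.lowerChar char], false)) ([], false)]
  rw [pvFoldl_camel name.toList [] false]
  rw [pvSplitOn_eq, pvJoin_nil_eq_flatten]
  have hcap : (fun p => PySem.Chars.upper (PySem.List.slice p none (some 1))
      ++ PySem.Chars.lower (PySem.List.slice p (some 1) none)) = pvCap := rfl
  rw [hcap]
  have h := pvHead_eq name.toList []
  simp only [PySem.Chars.lower, List.map_nil, List.nil_append] at h
  congr 1
  rw [← h]
  simp [PySem.Chars.lower]
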